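-- pv_equiv track=rewrite | github.com/MarcisinMatej/Coursera-BioInf-I | week_1_pattern/clump_finder.py | find_clump
-- ===== SOURCE A (Python) =====
-- def find_clump(sequence, k, window_size, treshold):
--     """
--
--     :param sequence:
--     :param window_size:
--     :param k: k-mer length
--     :param treshold: min number of matches of k-mer in window
--     :return:
--     """
--     clump_candidates = set()
--     # sliding of the window
--     window = sequence[0:window_size]
--     k_mers = get_k_mers_for_window(window, k)
--     for i in range(len(sequence) + 1 - window_size):
--         window = sequence[i:i + window_size]
--         # decrease first k-mer count
--         key = window[:k]
--         k_mers[key] = k_mers[key] - 1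
--         # add new k-mer
--         key = window[-k:]
--         if key in k_mers.keys():
--             k_mers[key] = k_mers[key] + 1
--         else:
--             k_mers[key] = 1
--         clump_candidates.update(get_k_mers_over_threshold(k_mers, treshold))
--     return clump_candidates
--
-- def get_k_mers_for_window(window, k):
--     res = {}
--     for i in range(len(window) - k + 1):
--         key = window[i:i+k]
--         if key in res.keys():
--             res[key] = res[key] + 1
--         else:
--             res[key] = 1
--     return res
--
-- def get_k_mers_over_threshold(k_mers, l):
--     candidates = []
--     for key in k_mers.keys():
--         if k_mers[key] >= l:
--             candidates.append(key)
--     return candidates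
-- ===== SOURCE B (Python) =====
-- def find_clump(sequence, k, window_size, treshold):
--     # Incremental: one full threshold scan on the first window step, then check
--     # only the k-mer whose count was just incremented (decrements never newly qualify).
--     counts = {}
--     window = sequence[0:window_size]
--     for i in range(len(window) - k + 1):
--         key = window[i:i + k]
--         counts[key] = counts.get(key, 0) + 1
--     result = set()
--     for i in range(len(sequence) + 1 - window_size):
--         window = sequence[i:i + window_size]
--         dec = window[:k]
--         counts[dec] = counts[dec] - 1
--         inc = window[-k:]
--         counts[inc] = counts.get(inc, 0) + 1
--         if i == 0:
--             for key, c in counts.items():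
--                 if c >= treshold:
--                     result.add(key)
--         elif counts[inc] >= treshold:
--             result.add(inc)
--     return result
-- ===== Notes on version B (the rewrite author's own statement) =====
-- stated objective: faster
-- what changed: B drops A's full scan of the k-mer dictionary after every window shift: it scans once after the first shift and thereafter checks only the single just-incremented k-mer, since decrementing a count can never make a k-mer newly reach the threshold; the counter is built with dict.get instead of a membership branch.
-- outside the precondition, e.g. on find_clump('ab', 2, 2, 1): A returns {'ab'}, B returns {'ab'}
import Mathlib
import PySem

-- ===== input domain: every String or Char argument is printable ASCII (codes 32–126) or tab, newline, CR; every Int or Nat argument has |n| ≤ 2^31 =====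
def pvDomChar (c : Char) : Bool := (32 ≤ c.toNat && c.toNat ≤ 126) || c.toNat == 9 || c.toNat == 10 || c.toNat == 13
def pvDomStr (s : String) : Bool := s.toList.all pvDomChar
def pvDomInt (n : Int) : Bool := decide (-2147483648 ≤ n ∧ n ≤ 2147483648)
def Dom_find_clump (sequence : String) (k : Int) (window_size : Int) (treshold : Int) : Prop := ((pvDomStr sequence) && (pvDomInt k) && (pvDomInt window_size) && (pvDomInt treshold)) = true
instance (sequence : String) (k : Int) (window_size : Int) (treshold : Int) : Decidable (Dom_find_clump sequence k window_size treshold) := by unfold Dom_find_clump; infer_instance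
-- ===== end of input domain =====

-- B replaces A's full dictionary scan after every window shift by one scan at the first
-- shift plus a check of only the just-incremented k-mer (decrements never newly reach the
-- threshold). Objective: faster (asymptotically fewer dictionary scans; timing on the
-- generated inputs was too small to measure).

-- ===== PORT A =====
def get_k_mers_for_window (window : String) (k : Int) : PySem.Dict String Int :=
  (PySem.List.pyRange 0 ((PySem.Str.len window : Int) - k + 1) 1).foldl
    (fun res i =>
      let key := PySem.Str.slice window (some i) (some (i + k))
      if res.contains key then res.insert key (res.getD key 0 + 1)
      else res.insert key 1)
    PySem.Dict.empty

def get_k_mers_over_threshold (k_mers : PySem.Dict String Int) (l : Int) : List String :=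
  k_mers.keys.foldl
    (fun candidates key =>
      if k_mers.getD key 0 ≥ l then candidates ++ [key] else candidates)
    []

def find_clump (sequence : String) (k : Int) (window_size : Int) (treshold : Int) : List String :=
  let window0 := PySem.Str.slice sequence (some 0) (some window_size)
  let k_mers0 := get_k_mers_for_window window0 k
  ((PySem.List.pyRange 0 ((PySem.Str.len sequence : Int) + 1 - window_size) 1).foldl
    (fun (st : PySem.Set String × PySem.Dict String Int) i =>
      let window := PySem.Str.slice sequence (some i) (some (i + window_size))
      let key1 := PySem.Str.slice window none (some k)
      -- k_mers[key1] - 1 : total via getD; exact under Pre_ (key1 is always present there)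
      let k_mers := st.2.insert key1 (st.2.getD key1 0 - 1)
      let key2 := PySem.Str.slice window (some (-k)) none
      let k_mers :=
        if k_mers.contains key2 then k_mers.insert key2 (k_mers.getD key2 0 + 1)
        else k_mers.insert key2 1
      (PySem.Set.update st.1 (get_k_mers_over_threshold k_mers treshold), k_mers))
    (PySem.Set.empty, k_mers0)).1

-- ===== PORT B =====
def find_clump_alt (sequence : String) (k : Int) (window_size : Int) (treshold : Int) : List String :=
  let window0 := PySem.Str.slice sequence (some 0) (some window_size)
  let counts0 :=
    (PySem.List.pyRange 0 ((PySem.Str.len window0 : Int) - k + 1) 1).foldl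
      (fun (counts : PySem.Dict String Int) i =>
        let key := PySem.Str.slice window0 (some i) (some (i + k))
        counts.insert key (counts.getD key 0 + 1))
      PySem.Dict.empty
  ((PySem.List.pyRange 0 ((PySem.Str.len sequence : Int) + 1 - window_size) 1).foldl
    (fun (st : PySem.Set String × PySem.Dict String Int) i =>
      let window := PySem.Str.slice sequence (some i) (some (i + window_size))
      let dec := PySem.Str.slice window none (some k)
      -- counts[dec] - 1 : total via getD; exact under Pre_ (dec is always present there)
      let counts := st.2.insert dec (st.2.getD dec 0 - 1)
      let inc := PySem.Str.slice window (some (-k)) none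
      let counts := counts.insert inc (counts.getD inc 0 + 1)
      let result :=
        if i == 0 then
          counts.items.foldl
            (fun r q => if q.2 ≥ treshold then PySem.Set.add r q.1 else r) st.1
        else if counts.getD inc 0 ≥ treshold then PySem.Set.add st.1 inc else st.1
      (result, counts))
    (PySem.Set.empty, counts0)).1

-- ===== PRECONDITION & SPEC =====
-- Pre_ excludes k ≥ window_size and the negative-k shapes whose windows are longer than |k|:
-- there A's first-k-mer dictionary lookup usually raises KeyError, and whether it returns
-- instead depends on the sequence's repeat structure, which is not a closed-form shape of the
-- input; on the excluded inputs where A does happen to return, B returns the same set.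
def Pre_find_clump (sequence : String) (k : Int) (window_size : Int) (treshold : Int) : Prop :=
  (PySem.Str.len sequence : Int) < window_size ∨ k = 0 ∨ (1 ≤ k ∧ k < window_size) ∨
  (k < 0 ∧ ((0 ≤ window_size ∧ window_size ≤ -k) ∨
            (window_size < 0 ∧ (PySem.Str.len sequence : Int) + window_size ≤ -k)))
instance (sequence : String) (k : Int) (window_size : Int) (treshold : Int) : Decidable (Pre_find_clump sequence k window_size treshold) := by unfold Pre_find_clump; infer_instance

def pvWitness_find_clump : String × Int × Int × Int := ("GATCAGCATAAGGGTCCCTGCAATGCATGACAAGCC", 3, 9, 2)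

def Spec_find_clump (sequence : String) (k : Int) (window_size : Int) (treshold : Int) (out : List String) : Prop := out = find_clump_alt sequence k window_size treshold
instance (sequence : String) (k : Int) (window_size : Int) (treshold : Int) (out : List String) : Decidable (Spec_find_clump sequence k window_size treshold out) := by unfold Spec_find_clump; infer_instance

-- ===== CLAIM (what is proved, stated in full; the proofs are below) =====
def Claim_equal_find_clump : Prop := ∀ (sequence : String) (k : Int) (window_size : Int) (treshold : Int), Dom_find_clump sequence k window_size treshold → Pre_find_clump sequence k window_size treshold → Spec_find_clump sequence k window_size treshold (find_clump sequence k window_size treshold)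

-- ===== LEMMAS AND PROOFS =====


-- proof-side abbreviations (used only below the claim block)
def pvWin (s : String) (w i : Int) : String := PySem.Str.slice s (some i) (some (i + w))
def pvDec (s : String) (k w i : Int) : String := PySem.Str.slice (pvWin s w i) none (some k)
def pvInc (s : String) (k w i : Int) : String := PySem.Str.slice (pvWin s w i) (some (-k)) none

def pvStepD (s : String) (k w : Int) (km : PySem.Dict String Int) (i : Int) : PySem.Dict String Int :=
  let km1 := km.insert (pvDec s k w i) (km.getD (pvDec s k w i) 0 - 1)
  km1.insert (pvInc s k w i) (km1.getD (pvInc s k w i) 0 + 1)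

def pvStepA (s : String) (k w t : Int) (st : PySem.Set String × PySem.Dict String Int) (i : Int) :
    PySem.Set String × PySem.Dict String Int :=
  let window := PySem.Str.slice s (some i) (some (i + w))
  let key1 := PySem.Str.slice window none (some k)
  let k_mers := st.2.insert key1 (st.2.getD key1 0 - 1)
  let key2 := PySem.Str.slice window (some (-k)) none
  let k_mers :=
    if k_mers.contains key2 then k_mers.insert key2 (k_mers.getD key2 0 + 1)
    else k_mers.insert key2 1
  (PySem.Set.update st.1 (get_k_mers_over_threshold k_mers t), k_mers)

def pvStepB (s : String) (k w t : Int) (st : PySem.Set String × PySem.Dict String Int) (i : Int) :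
    PySem.Set String × PySem.Dict String Int :=
  let window := PySem.Str.slice s (some i) (some (i + w))
  let dec := PySem.Str.slice window none (some k)
  let counts := st.2.insert dec (st.2.getD dec 0 - 1)
  let inc := PySem.Str.slice window (some (-k)) none
  let counts := counts.insert inc (counts.getD inc 0 + 1)
  let result :=
    if i == 0 then
      counts.items.foldl (fun r q => if q.2 ≥ t then PySem.Set.add r q.1 else r) st.1
    else if counts.getD inc 0 ≥ t then PySem.Set.add st.1 inc else st.1
  (result, counts)

def pvInitRange (s : String) (k w : Int) : List Int :=
  PySem.List.pyRange 0 ((PySem.Str.len (PySem.Str.slice s (some 0) (some w)) : Int) - k + 1) 1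

def pvKeyF (s : String) (k w i : Int) : String :=
  PySem.Str.slice (PySem.Str.slice s (some 0) (some w)) (some i) (some (i + k))

def pvInit (s : String) (k w : Int) : PySem.Dict String Int :=
  (pvInitRange s k w).foldl
    (fun counts i => counts.insert (pvKeyF s k w i) (counts.getD (pvKeyF s k w i) 0 + 1))
    PySem.Dict.empty

lemma pv_find_clump_eq (s : String) (k w t : Int) :
    find_clump s k w t =
      ((PySem.List.pyRange 0 ((PySem.Str.len s : Int) + 1 - w) 1).foldl (pvStepA s k w t)
        (PySem.Set.empty, get_k_mers_for_window (PySem.Str.slice s (some 0) (some w)) k)).1 := by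
  rfl

lemma pv_find_clump_alt_eq (s : String) (k w t : Int) :
    find_clump_alt s k w t =
      ((PySem.List.pyRange 0 ((PySem.Str.len s : Int) + 1 - w) 1).foldl (pvStepB s k w t)
        (PySem.Set.empty, pvInit s k w)).1 := by
  rfl

lemma pv_init_eq (s : String) (k w : Int) :
    get_k_mers_for_window (PySem.Str.slice s (some 0) (some w)) k = pvInit s k w := by
  
  unfold get_k_mers_for_window pvInit pvInitRange pvKeyF
  congr 1
  funext res i
  by_cases h : res.contains (PySem.Str.slice (PySem.Str.slice s (some 0) (some w)) (some i) (some (i + k)))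
  · simp [h]
  · rw [PySem.Dict.getD_of_not_contains _ _ ((Bool.not_eq_true _).mp h)]
    simp [h]

lemma pv_clampIdx (n : Nat) (x : Int) :
    (PySem.List.clampIdx n x : Int) = if x < 0 then max 0 ((n : Int) + x) else min x n := by
  
  simp only [PySem.List.clampIdx]
  split_ifs <;> omega

lemma pv_overThr_eq (d : PySem.Dict String Int) (t : Int) :
    get_k_mers_over_threshold d t = d.keys.filter (fun key => decide (d.getD key 0 ≥ t)) := by
  
  unfold get_k_mers_over_threshold
  have : (fun (candidates : List String) (key : String) =>
      if d.getD key 0 ≥ t then candidates ++ [key] else candidates)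
      = (fun acc x => if (fun key => decide (d.getD key 0 ≥ t)) x = true then acc ++ [id x] else acc) := by
    funext acc x; simp
  rw [this, PySem.List.foldl_append_if]
  simp

lemma pv_mem_overThr (d : PySem.Dict String Int) (t : Int) (key : String) :
    key ∈ get_k_mers_over_threshold d t ↔ key ∈ d.keys ∧ d.getD key 0 ≥ t := by
  
  rw [pv_overThr_eq]
  simp [List.mem_filter]

lemma pv_update_absorb (x : String) (L : List String) (S : PySem.Set String)
    (h : ∀ y ∈ L, y ≠ x → y ∈ S) :
    PySem.Set.update S L = if x ∈ L then PySem.Set.add S x else S := by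
  
  induction L generalizing S with
  | nil => simp [PySem.Set.update]
  | cons y L ih =>
    rw [PySem.Set.update_cons]
    by_cases hyx : y = x
    · subst hyx
      rw [ih (PySem.Set.add S y)
          (fun z hz hne => (PySem.Set.mem_add _ _ _).mpr (Or.inl (h z (List.mem_cons_of_mem _ hz) hne)))]
      by_cases hx : y ∈ L
      · simp [hx]
      · simp [hx]
    · have hy : y ∈ S := h y (List.mem_cons_self) hyx
      rw [PySem.Set.add_of_mem hy, ih S (fun z hz hne => h z (List.mem_cons_of_mem _ hz) hne)]
      simp [List.mem_cons, Ne.symm hyx]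

lemma pv_foldl_add_ite (t : Int) (g : String → Int) (l : List String) (S : PySem.Set String) :
    l.foldl (fun r key => if g key ≥ t then PySem.Set.add r key else r) S
      = PySem.Set.update S (l.filter (fun key => decide (g key ≥ t))) := by
  
  induction l generalizing S with
  | nil => simp [PySem.Set.update]
  | cons y l ih =>
    by_cases hy : g y ≥ t
    · have hf : List.filter (fun key => decide (g key ≥ t)) (y :: l)
          = y :: List.filter (fun key => decide (g key ≥ t)) l := by simp [hy]
      rw [hf, PySem.Set.update_cons]
      simp only [List.foldl_cons, if_pos hy]
      exact ih _
    · have hf : List.filter (fun key => decide (g key ≥ t)) (y :: l)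
          = List.filter (fun key => decide (g key ≥ t)) l := by simp [hy]
      rw [hf]
      simp only [List.foldl_cons, if_neg hy]
      exact ih _

lemma pv_stepA_dict (s : String) (k w t : Int) (st : PySem.Set String × PySem.Dict String Int) (i : Int) :
    pvStepA s k w t st i =
      (PySem.Set.update st.1 (get_k_mers_over_threshold (pvStepD s k w st.2 i) t),
       pvStepD s k w st.2 i) := by
  
  unfold pvStepA pvStepD pvDec pvInc pvWin
  dsimp only
  by_cases h : (st.2.insert (PySem.Str.slice (PySem.Str.slice s (some i) (some (i + w))) none (some k))
      (st.2.getD (PySem.Str.slice (PySem.Str.slice s (some i) (some (i + w))) none (some k)) 0 - 1)).contains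
      (PySem.Str.slice (PySem.Str.slice s (some i) (some (i + w))) (some (-k)) none)
  · simp [h]
  · rw [show ((st.2.insert (PySem.Str.slice (PySem.Str.slice s (some i) (some (i + w))) none (some k))
        (st.2.getD (PySem.Str.slice (PySem.Str.slice s (some i) (some (i + w))) none (some k)) 0 - 1)).getD
        (PySem.Str.slice (PySem.Str.slice s (some i) (some (i + w))) (some (-k)) none) 0) = 0 from
      PySem.Dict.getD_of_not_contains _ _ ((Bool.not_eq_true _).mp h)]
    simp [h]

lemma pv_stepB_eq (s : String) (k w t : Int) (st : PySem.Set String × PySem.Dict String Int) (i : Int)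
    (hi : i ≠ 0) :
    pvStepB s k w t st i =
      ((if (pvStepD s k w st.2 i).getD (pvInc s k w i) 0 ≥ t
        then PySem.Set.add st.1 (pvInc s k w i) else st.1),
       pvStepD s k w st.2 i) := by
  
  unfold pvStepB pvStepD pvDec pvInc pvWin
  simp [hi]

lemma pv_keys_stepD (s : String) (k w : Int) (km : PySem.Dict String Int) (i : Int) (key : String) :
    key ∈ (pvStepD s k w km i).keys ↔ key = pvInc s k w i ∨ key = pvDec s k w i ∨ key ∈ km.keys := by
  
  unfold pvStepD
  simp only [PySem.Dict.mem_keys_insert]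

lemma pv_nodup_stepD (s : String) (k w : Int) (km : PySem.Dict String Int) (i : Int)
    (h : km.keys.Nodup) : (pvStepD s k w km i).keys.Nodup := by
  
  unfold pvStepD
  exact PySem.Dict.nodup_keys_insert _ _ _ (PySem.Dict.nodup_keys_insert _ _ _ h)

lemma pv_getD_stepD_of_ne (s : String) (k w : Int) (km : PySem.Dict String Int) (i : Int)
    (key : String) (hne : key ≠ pvInc s k w i) :
    (pvStepD s k w km i).getD key 0 = if key = pvDec s k w i then km.getD key 0 - 1 else km.getD key 0 := by
  
  unfold pvStepD
  rw [PySem.Dict.getD_insert, if_neg hne, PySem.Dict.getD_insert]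
  by_cases hd : key = pvDec s k w i
  · subst hd; simp
  · simp [hd]

-- the main loop invariant: after the first iteration the two candidate accumulators stay equal
lemma pv_main_fold (s : String) (k w t : Int) (is : List Int)
    (cA cB : PySem.Set String) (km : PySem.Dict String Int)
    (hpw : is.Pairwise (· < ·))
    (hnz : ∀ i ∈ is, i ≠ 0)
    (hkeys : km.keys.Nodup)
    (hcc : cA = cB)
    (hthr : ∀ key, key ∈ km.keys → km.getD key 0 ≥ t → key ∈ cA)
    (hdec : ∀ i ∈ is, pvDec s k w i ∈ km.keys ∨ ∃ j ∈ is, j < i ∧ pvInc s k w j = pvDec s k w i) :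
    (is.foldl (pvStepA s k w t) (cA, km)).1 = (is.foldl (pvStepB s k w t) (cB, km)).1 := by
  
  induction is generalizing cA cB km with
  | nil => simpa using hcc
  | cons i rest ih =>
    have hlt : ∀ j ∈ rest, i < j := (List.pairwise_cons.mp hpw).1
    have hpw' := (List.pairwise_cons.mp hpw).2
    have hdem : pvDec s k w i ∈ km.keys := by
      rcases hdec i List.mem_cons_self with h | ⟨j, hj, hji, _⟩
      · exact h
      · rcases List.mem_cons.mp hj with rfl | hj'
        · exact absurd hji (lt_irrefl _)
        · exact absurd hji (not_lt.mpr (le_of_lt (hlt _ hj')))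
    have hstepA : pvStepA s k w t (cA, km) i
        = (PySem.Set.update cA (get_k_mers_over_threshold (pvStepD s k w km i) t), pvStepD s k w km i) :=
      pv_stepA_dict s k w t (cA, km) i
    have hstepB : pvStepB s k w t (cB, km) i
        = ((if (pvStepD s k w km i).getD (pvInc s k w i) 0 ≥ t
            then PySem.Set.add cB (pvInc s k w i) else cB), pvStepD s k w km i) :=
      pv_stepB_eq s k w t (cB, km) i (hnz i List.mem_cons_self)
    have hincmem : pvInc s k w i ∈ (pvStepD s k w km i).keys :=
      (pv_keys_stepD s k w km i _).mpr (Or.inl rfl)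
    have hside : ∀ y ∈ get_k_mers_over_threshold (pvStepD s k w km i) t, y ≠ pvInc s k w i → y ∈ cA := by
      intro y hy hne
      obtain ⟨hyk, hyge⟩ := (pv_mem_overThr _ _ _).mp hy
      have hykm : y ∈ km.keys := by
        rcases (pv_keys_stepD s k w km i y).mp hyk with h1 | h2 | h3
        · exact absurd h1 hne
        · exact h2 ▸ hdem
        · exact h3
      have hge : km.getD y 0 ≥ t := by
        have hgd := pv_getD_stepD_of_ne s k w km i y hne
        by_cases hyd : y = pvDec s k w i
        · rw [if_pos hyd] at hgd; omega
        · rw [if_neg hyd] at hgd; omega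
      exact hthr y hykm hge
    have habs : PySem.Set.update cA (get_k_mers_over_threshold (pvStepD s k w km i) t)
        = if (pvStepD s k w km i).getD (pvInc s k w i) 0 ≥ t
          then PySem.Set.add cA (pvInc s k w i) else cA := by
      rw [pv_update_absorb (pvInc s k w i) _ cA hside]
      by_cases hge : (pvStepD s k w km i).getD (pvInc s k w i) 0 ≥ t
      · rw [if_pos ((pv_mem_overThr _ _ _).mpr ⟨hincmem, hge⟩), if_pos hge]
      · rw [if_neg (fun hmem => hge ((pv_mem_overThr _ _ _).mp hmem).2), if_neg hge]
    simp only [List.foldl_cons]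
    rw [hstepA, hstepB, habs, hcc]
    refine ih _ _ _ hpw' (fun j hj => hnz j (List.mem_cons_of_mem _ hj))
      (pv_nodup_stepD s k w km i hkeys) rfl ?_ ?_
    · intro key hkey hge
      have hm : key ∈ PySem.Set.update cA (get_k_mers_over_threshold (pvStepD s k w km i) t) :=
        (PySem.Set.mem_update _ _ _).mpr (Or.inr ((pv_mem_overThr _ _ _).mpr ⟨hkey, hge⟩))
      rwa [habs, hcc] at hm
    · intro i' hi'
      rcases hdec i' (List.mem_cons_of_mem _ hi') with h | ⟨j, hj, hji, heq⟩
      · exact Or.inl ((pv_keys_stepD s k w km i _).mpr (Or.inr (Or.inr h)))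
      · rcases List.mem_cons.mp hj with hji2 | hj'
        · exact Or.inl ((pv_keys_stepD s k w km i _).mpr
            (Or.inl (heq.symm.trans (congrArg (pvInc s k w) hji2))))
        · exact Or.inr ⟨j, hj', hji, heq⟩


lemma pv_mem_init_keys (s : String) (k w : Int) (j : Int) (h0 : 0 ≤ j)
    (hlt : j < PySem.Str.len (PySem.Str.slice s (some 0) (some w)) - k + 1) :
    pvKeyF s k w j ∈ (pvInit s k w).keys := by
  unfold pvInit pvInitRange
  rw [PySem.Dict.keys_foldl_insert_key]
  refine (PySem.Set.mem_update _ _ _).mpr (Or.inr ?_)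
  exact List.mem_map_of_mem (PySem.List.mem_pyRange_one.mpr ⟨h0, hlt⟩)

lemma pv_nodup_init_keys (s : String) (k w : Int) : (pvInit s k w).keys.Nodup := by
  unfold pvInit pvInitRange
  exact PySem.Dict.nodup_keys_foldl_insert_key _ _ _ _ PySem.Dict.nodup_keys_empty

lemma pv_clampIdx_zero (n : Nat) (k : Int) (h : k = 0 ∨ (n : Int) + k ≤ 0) :
    PySem.List.clampIdx n k = 0 := by
  simp only [PySem.List.clampIdx]
  split_ifs <;> omega

lemma pv_slice_to_empty (xs : List Char) (k : Int) (h : k = 0 ∨ (xs.length : Int) + k ≤ 0) :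
    PySem.List.slice xs none (some k) = [] := by
  simp [PySem.List.slice, pv_clampIdx_zero xs.length k h]

lemma pv_len_winlist (s : String) (w i : Int) :
    (pvWin s w i).toList.length =
      PySem.List.clampIdx s.toList.length (i + w) - PySem.List.clampIdx s.toList.length i := by
  unfold pvWin
  rw [PySem.Str.toList_slice]
  simp only [PySem.Chars.slice_eq_listSlice]
  rw [PySem.List.length_slice]

lemma pv_win_list (s : String) (W I : Nat) :
    (pvWin s (W : Int) (I : Int)).toList = (s.toList.drop I).take W := by
  unfold pvWin
  rw [PySem.Str.toList_slice]
  simp only [PySem.Chars.slice_eq_listSlice]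
  rw [PySem.List.slice_toNat _ (by positivity) (by positivity)]
  have e1 : ((I : Int) + (W : Int)).toNat - ((I : Int)).toNat = W := by omega
  have e2 : ((I : Int)).toNat = I := by omega
  rw [e1, e2]

lemma pv_dec_list (s : String) (K W I : Nat) (hKW : K ≤ W) :
    (pvDec s (K : Int) (W : Int) (I : Int)).toList = (s.toList.drop I).take K := by
  unfold pvDec
  rw [PySem.Str.toList_slice]
  simp only [PySem.Chars.slice_eq_listSlice]
  rw [PySem.List.slice_to _ (by positivity), pv_win_list s W I]
  rw [List.take_take]
  simp [Nat.min_eq_left hKW]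

lemma pv_inc_list (s : String) (K W I : Nat) (hK : 0 < K) (hKW : K ≤ W)
    (h : I + W ≤ s.toList.length) :
    (pvInc s (K : Int) (W : Int) (I : Int)).toList = (s.toList.drop (I + W - K)).take K := by
  unfold pvInc
  rw [PySem.Str.toList_slice]
  simp only [PySem.Chars.slice_eq_listSlice]
  rw [PySem.List.slice_from_neg_natCast _ K hK, pv_win_list s W I]
  have hlen : ((s.toList.drop I).take W).length = W := by
    rw [List.length_take, List.length_drop]
    omega
  rw [hlen, List.drop_take, List.drop_drop]
  have e1 : W - (W - K) = K := by omega
  have e2 : I + (W - K) = I + W - K := by omega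
  rw [e1, e2]

lemma pv_keyF_list (s : String) (K W J : Nat) (hJK : J + K ≤ W) :
    (pvKeyF s (K : Int) (W : Int) (J : Int)).toList = (s.toList.drop J).take K := by
  unfold pvKeyF
  rw [PySem.Str.toList_slice]
  simp only [PySem.Chars.slice_eq_listSlice]
  rw [PySem.List.slice_toNat _ (by positivity) (by positivity)]
  have e1 : ((J : Int) + (K : Int)).toNat - ((J : Int)).toNat = K := by omega
  have e2 : ((J : Int)).toNat = J := by omega
  rw [e1, e2, PySem.Str.toList_slice]
  simp only [PySem.Chars.slice_eq_listSlice]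
  rw [PySem.List.slice_zero_start, PySem.List.slice_to _ (by positivity)]
  have e3 : ((W : Int)).toNat = W := by omega
  rw [e3, List.drop_take, List.take_take]
  congr 1
  omega

lemma pv_lenW0 (s : String) (W : Nat) (hW : W ≤ s.toList.length) :
    PySem.Str.len (PySem.Str.slice s (some 0) (some (W : Int))) = (W : Int) := by
  unfold PySem.Str.len
  rw [PySem.Str.toList_slice]
  simp only [PySem.Chars.slice_eq_listSlice]
  have e3 : ((W : Int)).toNat = W := by omega
  rw [PySem.List.slice_zero_start, PySem.List.slice_to _ (by positivity), e3, List.length_take]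
  omega

-- presence of the decremented k-mer, from Pre_
lemma pv_presence (s : String) (k w t : Int)
    (hpre : Pre_find_clump s k w t) (i : Int) (h0 : 0 ≤ i) (hi : i < (PySem.Str.len s : Int) + 1 - w) :
    pvDec s k w i ∈ (pvInit s k w).keys ∨
      ∃ j, 0 ≤ j ∧ j < i ∧ pvInc s k w j = pvDec s k w i := by
  
  have hlen : PySem.Str.len s = (s.toList.length : Int) := rfl
  rcases hpre with hnw | hk0 | ⟨hk1, hkw⟩ | ⟨hkneg, hsh⟩
  · exfalso; rw [hlen] at hi; omega
  · -- k = 0 : the decremented key is always the empty string, a key of the initial dict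
    left
    subst hk0
    have hdec : pvDec s 0 w i = pvKeyF s 0 w 0 := by
      rw [← String.toList_inj]
      unfold pvDec pvKeyF
      rw [PySem.Str.toList_slice, PySem.Str.toList_slice]
      simp only [PySem.Chars.slice_eq_listSlice]
      rw [PySem.List.slice_zero_start]
      norm_num
      rw [pv_slice_to_empty _ _ (Or.inl rfl), pv_slice_to_empty _ _ (Or.inl rfl)]
    rw [hdec]
    apply pv_mem_init_keys s 0 w 0 le_rfl
    have : 0 ≤ PySem.Str.len (PySem.Str.slice s (some 0) (some w)) := by
      unfold PySem.Str.len; positivity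
    omega
  · -- 1 ≤ k < w : the main case
    have hiw : i + w ≤ (s.toList.length : Int) := by rw [hlen] at hi; omega
    obtain ⟨I, rfl⟩ : ∃ I : Nat, i = (I : Int) := ⟨i.toNat, by omega⟩
    obtain ⟨K, rfl⟩ : ∃ K : Nat, k = (K : Int) := ⟨k.toNat, by omega⟩
    obtain ⟨W, rfl⟩ : ∃ W : Nat, w = (W : Int) := ⟨w.toNat, by omega⟩
    have hK1 : 1 ≤ K := by omega
    have hKW : K < W := by omega
    have hIW : I + W ≤ s.toList.length := by omega
    by_cases hcase : I + K ≤ W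
    · -- the first k-mer of the window is a k-mer of the initial window
      left
      have hdec : pvDec s (K : Int) (W : Int) (I : Int) = pvKeyF s (K : Int) (W : Int) (I : Int) := by
        rw [← String.toList_inj, pv_dec_list s K W I (le_of_lt hKW),
            pv_keyF_list s K W I hcase]
      rw [hdec]
      apply pv_mem_init_keys s _ _ _ (by positivity)
      rw [pv_lenW0 s W (by omega)]
      omega
    · -- it was inserted as the newest k-mer of an earlier window
      right
      refine ⟨((I + K - W : Nat) : Int), by positivity, by omega, ?_⟩
      rw [← String.toList_inj, pv_dec_list s K W I (le_of_lt hKW),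
          pv_inc_list s K W (I + K - W) hK1 (le_of_lt hKW) (by omega)]
      congr 2
      omega
  · -- k < 0 : every window is at most |k| long, so the decremented key is the empty string
    left
    have hwin : ((pvWin s w i).toList.length : Int) + k ≤ 0 := by
      have hl := pv_len_winlist s w i
      have c1 := pv_clampIdx s.toList.length (i + w)
      have c2 := pv_clampIdx s.toList.length i
      rw [hlen] at hsh
      split_ifs at c1 c2 <;> omega
    have hdec : pvDec s k w i = pvKeyF s k w 0 := by
      rw [← String.toList_inj]
      unfold pvDec pvKeyF
      rw [PySem.Str.toList_slice, PySem.Str.toList_slice]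
      simp only [PySem.Chars.slice_eq_listSlice]
      rw [PySem.List.slice_zero_start]
      norm_num
      rw [pv_slice_to_empty _ _ (Or.inr ?h1), pv_slice_to_empty _ _ (Or.inr ?h2)]
      case h1 => exact hwin
      case h2 =>
        rw [show PySem.List.slice s.toList none (some w)
            = List.take (PySem.List.clampIdx s.toList.length w) s.toList from by
          simp [PySem.List.slice]]
        rw [List.length_take]
        have c1 := pv_clampIdx s.toList.length w
        have c2 := pv_clampIdx s.toList.length 0
        rw [hlen] at hsh
        split_ifs at c1 c2 <;> omega
    rw [hdec]
    apply pv_mem_init_keys s k w 0 le_rfl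
    have : 0 ≤ PySem.Str.len (PySem.Str.slice s (some 0) (some w)) := by
      unfold PySem.Str.len; positivity
    omega


lemma pv_stepB_zero (s : String) (k w t : Int) (st : PySem.Set String × PySem.Dict String Int) :
    pvStepB s k w t st 0 =
      ((pvStepD s k w st.2 0).items.foldl
          (fun r q => if q.2 ≥ t then PySem.Set.add r q.1 else r) st.1,
       pvStepD s k w st.2 0) := by
  unfold pvStepB pvStepD pvDec pvInc pvWin
  norm_num

lemma pv_scan_eq (d : PySem.Dict String Int) (t : Int) (hnd : d.keys.Nodup) (S : PySem.Set String) :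
    d.items.foldl (fun r q => if q.2 ≥ t then PySem.Set.add r q.1 else r) S
      = PySem.Set.update S (get_k_mers_over_threshold d t) := by
  rw [PySem.Dict.items_eq_map_keys d hnd 0, List.foldl_map, pv_overThr_eq]
  exact pv_foldl_add_ite t (fun key => d.getD key 0) d.keys S

-- ===== VERDICT (by name: the statement is the Claim_ definition above) =====
theorem find_clump_spec : Claim_equal_find_clump := by
  
  intro s k w t _ hpre
  unfold Spec_find_clump
  rw [pv_find_clump_eq, pv_find_clump_alt_eq, pv_init_eq]
  by_cases hnum : 0 < PySem.Str.len s + 1 - w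
  · rw [PySem.List.pyRange_one_cons hnum]
    simp only [List.foldl_cons]
    rw [pv_stepA_dict, pv_stepB_zero,
        pv_scan_eq _ t (pv_nodup_stepD s k w _ 0 (pv_nodup_init_keys s k w)) _]
    apply pv_main_fold s k w t _ _ _ _
      (PySem.List.pairwise_lt_pyRange_one _ _)
      (fun i hi => by have := PySem.List.mem_pyRange_one.mp hi; omega)
      (pv_nodup_stepD s k w _ 0 (pv_nodup_init_keys s k w))
      rfl
    · intro key hkey hge
      exact (PySem.Set.mem_update _ _ _).mpr (Or.inr ((pv_mem_overThr _ _ _).mpr ⟨hkey, hge⟩))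
    · intro i hi
      obtain ⟨hi1, hi2⟩ := PySem.List.mem_pyRange_one.mp hi
      rcases pv_presence s k w t hpre i (by omega) hi2 with h | ⟨j, hj0, hji, heq⟩
      · exact Or.inl ((pv_keys_stepD s k w _ 0 _).mpr (Or.inr (Or.inr h)))
      · by_cases hj : j = 0
        · subst hj
          exact Or.inl ((pv_keys_stepD s k w _ 0 _).mpr (Or.inl heq.symm))
        · exact Or.inr ⟨j, PySem.List.mem_pyRange_one.mpr ⟨by omega, by omega⟩, hji, heq⟩
  · have hz : (PySem.Str.len s + 1 - w).toNat = 0 := by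
      unfold PySem.Str.len at hnum ⊢
      omega
    rw [show PySem.List.pyRange 0 (PySem.Str.len s + 1 - w) 1 = [] from by
      rw [PySem.List.pyRange_zero, hz]
      rfl]
    rfl
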